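-- pv_equiv track=rewrite | github.com/simonchih/16mj | 16mj.py | p0_add_kong
-- ===== SOURCE A (Python) =====
-- def p0_add_kong(dj, mj, gmj, dindex):
--     if None == dindex:
--         return None
--     elif gmj != None:
--         tmj, tmj_num = insert_mj(gmj, mj)
--
--     for i in range(tmj_num):
--         if 3 == dj[dindex][0] and tmj[i] == dj[dindex][1][0]:
--             return i, tmj, tmj_num
--
--     return None
--
-- def insert_mj(mjv, mj):
--     return_mj = mj[:]
--     for i, v in enumerate(return_mj):
--         if mjv <= v:
--             return_mj = return_mj[:i] + [mjv] + return_mj[i:]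
--             return return_mj, len(return_mj)
--
--     return_mj.append(mjv)
--     return return_mj, len(return_mj)
-- ===== SOURCE B (Python) =====
-- def p0_add_kong(dj, mj, gmj, dindex):
--     if dindex is None:
--         return None
--     # split mj into the longest prefix strictly below gmj and the rest,
--     # then place gmj between them (same spot as A's first 'gmj <= v' scan)
--     pre = []
--     rest = mj
--     while rest and rest[0] < gmj:
--         pre.append(rest[0])
--         rest = rest[1:]
--     tmj = pre + [gmj] + rest
--     tmj_num = len(tmj)
--     kind, tiles = dj[dindex]
--     if kind != 3:
--         return None
--     target = tiles[0]
--     if target in tmj: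
--         return tmj.index(target), tmj, tmj_num
--     return None
-- ===== Notes on version B (the rewrite author's own statement) =====
-- stated objective: simpler
-- what changed: B replaces A's insert_mj helper (enumerate + slice-rebuild to insert the drawn tile) by a single prefix/suffix split around gmj, hoists the loop-invariant dj[dindex][0]==3 check out of the scan, and replaces the index-by-index range scan with a membership test plus list.index.
import Mathlib
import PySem

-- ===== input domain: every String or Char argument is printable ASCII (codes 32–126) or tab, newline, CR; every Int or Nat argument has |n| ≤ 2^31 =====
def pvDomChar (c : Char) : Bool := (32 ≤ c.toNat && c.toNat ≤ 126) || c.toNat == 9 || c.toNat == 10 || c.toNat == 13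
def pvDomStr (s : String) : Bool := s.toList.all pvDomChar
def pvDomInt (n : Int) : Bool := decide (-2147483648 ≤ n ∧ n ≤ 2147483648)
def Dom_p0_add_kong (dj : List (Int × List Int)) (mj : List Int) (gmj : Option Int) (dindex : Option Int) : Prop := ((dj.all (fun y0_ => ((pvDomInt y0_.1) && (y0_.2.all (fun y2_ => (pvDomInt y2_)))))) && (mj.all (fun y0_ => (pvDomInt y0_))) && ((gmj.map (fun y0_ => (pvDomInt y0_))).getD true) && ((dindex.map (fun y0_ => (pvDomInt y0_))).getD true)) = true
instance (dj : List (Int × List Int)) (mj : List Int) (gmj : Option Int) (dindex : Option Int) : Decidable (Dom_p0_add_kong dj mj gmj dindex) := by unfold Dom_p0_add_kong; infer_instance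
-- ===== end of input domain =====

-- B replaces A's slice-rebuilding insertion scan by a prefix/suffix split and A's
-- per-index conjunction scan by a hoisted kind check plus list.index (objective: simpler).

-- ===== PORT A =====
-- insert_mj's for-loop over enumerate(return_mj): at the first v with mjv ≤ v, rebuild via slices
def insertMjLoop (mjv : Int) (return_mj : List Int) : List (Int × Int) → Option (List Int × Int)
  | [] => none
  | (i, v) :: rest =>
      if mjv ≤ v then
        let r := PySem.List.slice return_mj none (some i) ++ [mjv] ++ PySem.List.slice return_mj (some i) none
        some (r, (r.length : Int))
      else insertMjLoop mjv return_mj rest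

def insertMj (mjv : Int) (mj : List Int) : List Int × Int :=
  let return_mj := mj
  match insertMjLoop mjv return_mj (PySem.List.enumerate return_mj 0) with
  | some p => p
  | none => let r := return_mj ++ [mjv]; (r, (r.length : Int))

-- the for-loop over range(tmj_num); dj[dindex] / …[1][0] lookups can raise (none = outside Pre_)
def kongLoop (dj : List (Int × List Int)) (d : Int) (tmj : List Int) (tmjNum : Int) :
    List Int → Option (Int × List Int × Int)
  | [] => none
  | i :: rest =>
      match PySem.List.pyGet? dj d with
      | none => none   -- IndexError in Python (outside Pre_)
      | some p =>
          if p.1 = 3 then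
            match PySem.List.pyGet? tmj i, PySem.List.pyGet? p.2 0 with
            | some x, some t =>
                if x = t then some (i, tmj, tmjNum) else kongLoop dj d tmj tmjNum rest
            | _, _ => none   -- IndexError in Python (outside Pre_)
          else kongLoop dj d tmj tmjNum rest

def p0_add_kong (dj : List (Int × List Int)) (mj : List Int) (gmj : Option Int) (dindex : Option Int) : Option (Int × List Int × Int) :=
  match dindex with
  | none => none
  | some d =>
      match gmj with
      | none => none   -- Python: NameError (tmj unbound) — outside Pre_
      | some g =>
          let tp := insertMj g mj
          kongLoop dj d tp.1 tp.2 (PySem.List.pyRange 0 tp.2 1)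

-- ===== PORT B =====
-- the while-loop: longest prefix strictly below gmj, and the remaining suffix
def splitBelow (g : Int) : List Int → List Int × List Int
  | [] => ([], [])
  | v :: rest =>
      if v < g then
        let p := splitBelow g rest
        (v :: p.1, p.2)
      else ([], v :: rest)

def p0_add_kong_alt (dj : List (Int × List Int)) (mj : List Int) (gmj : Option Int) (dindex : Option Int) : Option (Int × List Int × Int) :=
  match dindex with
  | none => none
  | some d =>
      match gmj with
      | none => none   -- Python B raises here too (outside Pre_)
      | some g =>
          let pr := splitBelow g mj
          let tmj := pr.1 ++ [g] ++ pr.2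
          let tmjNum : Int := tmj.length
          match PySem.List.pyGet? dj d with
          | none => none   -- IndexError (outside Pre_)
          | some p =>
              if p.1 ≠ 3 then none
              else
                match PySem.List.pyGet? p.2 0 with
                | none => none   -- IndexError (outside Pre_)
                | some target =>
                    if target ∈ tmj then
                      (PySem.List.index? tmj target).map (fun m => ((m : Int), tmj, tmjNum))
                    else none

-- ===== PRECONDITION & SPEC =====
-- Pre_ excludes exactly the inputs on which Python A raises: gmj = None with dindex set
-- (NameError: tmj unbound), dindex out of range for dj (IndexError), and an empty tile list
-- when the selected dj entry has kind 3 (IndexError on dj[dindex][1][0]).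
def Pre_p0_add_kong (dj : List (Int × List Int)) (mj : List Int) (gmj : Option Int) (dindex : Option Int) : Prop :=
  dindex = none ∨
    (gmj ≠ none ∧
      PySem.Raise.InRange dj.length (dindex.getD 0) ∧
      (((PySem.List.pyGet? dj (dindex.getD 0)).getD (0, [])).1 = 3 →
        ((PySem.List.pyGet? dj (dindex.getD 0)).getD (0, [])).2 ≠ []))
instance (dj : List (Int × List Int)) (mj : List Int) (gmj : Option Int) (dindex : Option Int) : Decidable (Pre_p0_add_kong dj mj gmj dindex) := by unfold Pre_p0_add_kong; infer_instance

def pvWitness_p0_add_kong : (List (Int × List Int)) × List Int × Option Int × Option Int :=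
  ([(3, [4, 4, 4])], [1, 2, 4, 7], some 4, some 0)

def Spec_p0_add_kong (dj : List (Int × List Int)) (mj : List Int) (gmj : Option Int) (dindex : Option Int) (out : Option (Int × List Int × Int)) : Prop := out = p0_add_kong_alt dj mj gmj dindex
instance (dj : List (Int × List Int)) (mj : List Int) (gmj : Option Int) (dindex : Option Int) (out : Option (Int × List Int × Int)) : Decidable (Spec_p0_add_kong dj mj gmj dindex out) := by unfold Spec_p0_add_kong; infer_instance

-- ===== CLAIM (what is proved, stated in full; the proofs are below) =====
def Claim_equal_p0_add_kong : Prop := ∀ (dj : List (Int × List Int)) (mj : List Int) (gmj : Option Int) (dindex : Option Int), Dom_p0_add_kong dj mj gmj dindex → Pre_p0_add_kong dj mj gmj dindex → Spec_p0_add_kong dj mj gmj dindex (p0_add_kong dj mj gmj dindex)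

-- ===== LEMMAS AND PROOFS =====

theorem splitBelow_append (g : Int) (l : List Int) :
    (splitBelow g l).1 ++ (splitBelow g l).2 = l := by
  induction l with
  | nil => rfl
  | cons v r ih => by_cases h : v < g <;> simp [splitBelow, h, ih]

-- A's insert_mj loop, started after a consumed prefix `pre`, computes B's split-based insertion
theorem insertMjLoop_split (g : Int) (rest pre : List Int) :
    insertMjLoop g (pre ++ rest) (PySem.List.enumerate rest (pre.length : Int)) =
      (if (splitBelow g rest).2 = [] then none
       else some (pre ++ (splitBelow g rest).1 ++ [g] ++ (splitBelow g rest).2,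
         ((pre ++ (splitBelow g rest).1 ++ [g] ++ (splitBelow g rest).2).length : Int))) := by
  induction rest generalizing pre with
  | nil => simp [insertMjLoop, splitBelow, PySem.List.enumerate_nil]
  | cons v r ih =>
    rw [PySem.List.enumerate_cons]
    by_cases h : g ≤ v
    · have hv : ¬ v < g := by omega
      simp only [insertMjLoop, if_pos h, splitBelow, if_neg hv]
      rw [PySem.List.slice_to_natCast, PySem.List.slice_from_natCast]
      simp
    · have hv : v < g := by omega
      have hcast : (pre.length : Int) + 1 = ((pre ++ [v]).length : Int) := by simp
      simp only [insertMjLoop, if_neg h, splitBelow, if_pos hv]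
      rw [hcast]
      have := ih (pre ++ [v])
      rw [show pre ++ [v] ++ r = pre ++ v :: r by simp] at this
      rw [this]
      by_cases h2 : (splitBelow g r).2 = [] <;> simp [h2]

theorem insertMj_eq_split (g : Int) (mj : List Int) :
    insertMj g mj = ((splitBelow g mj).1 ++ [g] ++ (splitBelow g mj).2,
                     (((splitBelow g mj).1 ++ [g] ++ (splitBelow g mj).2).length : Int)) := by
  have h := insertMjLoop_split g mj []
  simp only [List.nil_append, List.length_nil, Nat.cast_zero] at h
  show (match insertMjLoop g mj (PySem.List.enumerate mj 0) with
        | some p => p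
        | none => (mj ++ [g], ((mj ++ [g]).length : Int))) = _
  rw [h]
  by_cases h2 : (splitBelow g mj).2 = []
  · have h1 : (splitBelow g mj).1 = mj := by
      have := splitBelow_append g mj
      rw [h2] at this; simpa using this
    simp [h2, h1]
  · simp [h2]

-- A's range-scan is first-match search: B's membership test + index
theorem kongLoop_index (dj : List (Int × List Int)) (d : Int) (tmj : List Int) (n : Int)
    (k : Int) (ts : List Int) (t : Int)
    (hget : PySem.List.pyGet? dj d = some (k, ts)) (hk : k = 3)
    (ht : PySem.List.pyGet? ts 0 = some t) :
    ∀ (j : Nat), j ≤ tmj.length →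
    kongLoop dj d tmj n (PySem.List.pyRange (j : Int) (tmj.length : Int) 1) =
      (PySem.List.index? (tmj.drop j) t).map (fun m => (((j + m : Nat) : Int), tmj, n)) := by
  intro j hj
  induction hlen : tmj.length - j generalizing j with
  | zero =>
    have hje : j = tmj.length := by omega
    subst hje
    have hnil : PySem.List.pyRange (tmj.length:Int) (tmj.length:Int) 1 = [] :=
      List.eq_nil_of_length_eq_zero (by rw [PySem.List.length_pyRange_one]; omega)
    rw [hnil]
    simp [kongLoop]
  | succ m ih =>
    have hjlt : j < tmj.length := by omega
    rw [PySem.List.pyRange_one_cons (by exact_mod_cast hjlt)]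
    have hx : PySem.List.pyGet? tmj (j : Int) = some tmj[j] :=
      PySem.List.pyGet?_ofNat tmj j hjlt
    have hdrop : tmj.drop j = tmj[j] :: tmj.drop (j + 1) := List.drop_eq_getElem_cons hjlt
    by_cases he : tmj[j] = t
    · have hstep : kongLoop dj d tmj n ((j:Int) :: PySem.List.pyRange ((j:Int)+1) (tmj.length:Int) 1)
          = some ((j:Int), tmj, n) := by simp [kongLoop, hget, hk, hx, ht, he]
      rw [hstep, hdrop, he, PySem.List.index?_cons_self]
      simp
    · have hcast : ((j : Int) + 1) = (((j + 1 : Nat)) : Int) := by push_cast; ring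
      have hstep : kongLoop dj d tmj n ((j:Int) :: PySem.List.pyRange ((j:Int)+1) (tmj.length:Int) 1)
          = kongLoop dj d tmj n (PySem.List.pyRange ((j:Int)+1) (tmj.length:Int) 1) := by
        simp [kongLoop, hget, hk, hx, ht, he]
      rw [hstep, hcast, ih (j+1) (by omega) (by omega), hdrop]
      rw [PySem.List.index?_cons_of_ne _ he]
      cases PySem.List.index? (tmj.drop (j+1)) t with
      | none => simp
      | some v => simp; omega

theorem kongLoop_not3 (dj : List (Int × List Int)) (d : Int) (tmj : List Int) (n : Int) (p : Int × List Int)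
    (hget : PySem.List.pyGet? dj d = some p) (hk : p.1 ≠ 3) (l : List Int) :
    kongLoop dj d tmj n l = none := by
  induction l with
  | nil => rfl
  | cons i rest ih => simp [kongLoop, hget, hk, ih]

-- ===== VERDICT (by name: the statement is the Claim_ definition above) =====
theorem p0_add_kong_spec : Claim_equal_p0_add_kong := by
  intro dj mj gmj dindex _ hpre
  unfold Spec_p0_add_kong
  cases dindex with
  | none => rfl
  | some d =>
    cases gmj with
    | none =>
      rcases hpre with h | ⟨hg, _⟩
      · exact absurd h (by simp)
      · exact absurd rfl hg
    | some g =>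
      rcases hpre with h | ⟨_, hin, h3⟩
      · exact absurd h (by simp)
      simp only [Option.getD_some] at hin h3
      obtain ⟨p, hp⟩ : ∃ p, PySem.List.pyGet? dj d = some p := by
        cases hq : PySem.List.pyGet? dj d with
        | none => exact absurd hin ((PySem.List.pyGet?_eq_none_iff dj d).mp hq)
        | some p => exact ⟨p, rfl⟩
      rw [hp] at h3
      simp only [Option.getD_some] at h3
      show kongLoop dj d (insertMj g mj).1 (insertMj g mj).2
            (PySem.List.pyRange 0 (insertMj g mj).2 1) = _
      rw [insertMj_eq_split]
      set tmj := (splitBelow g mj).1 ++ [g] ++ (splitBelow g mj).2 with htmj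
      by_cases hk : p.1 = 3
      · obtain ⟨t, ts', hts⟩ : ∃ t ts', p.2 = t :: ts' := by
          cases hq : p.2 with
          | nil => exact absurd hq (h3 hk)
          | cons t ts' => exact ⟨t, ts', rfl⟩
        have ht : PySem.List.pyGet? p.2 0 = some t := by
          rw [hts]; exact PySem.List.pyGet?_zero_cons t ts'
        have hA := kongLoop_index dj d tmj (tmj.length : Int) p.1 p.2 t
          (by rw [hp]) hk ht 0 (by omega)
        simp only [Nat.cast_zero, List.drop_zero, Nat.zero_add] at hA
        have hBalt : p0_add_kong_alt dj mj (some g) (some d) =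
            (if t ∈ tmj then
               (PySem.List.index? tmj t).map (fun m => ((m : Int), tmj, (tmj.length : Int)))
             else none) := by
          show (match PySem.List.pyGet? dj d with
                | none => none
                | some p =>
                    if p.1 ≠ 3 then none
                    else match PySem.List.pyGet? p.2 0 with
                      | none => none
                      | some target =>
                          if target ∈ tmj then
                            (PySem.List.index? tmj target).map (fun m => ((m : Int), tmj, (tmj.length : Int)))
                          else none) = _
          simp only [hp]
          rw [if_neg (by simp [hk]), ht]
        rw [hA, hBalt]
        by_cases hmem : t ∈ tmj
        · rw [if_pos hmem]
          cases PySem.List.index? tmj t <;> rfl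
        · rw [if_neg hmem, (PySem.List.index?_eq_none_iff tmj t).mpr hmem]
          rfl
      · have hBalt : p0_add_kong_alt dj mj (some g) (some d) = none := by
          show (match PySem.List.pyGet? dj d with
                | none => none
                | some p =>
                    if p.1 ≠ 3 then none
                    else match PySem.List.pyGet? p.2 0 with
                      | none => none
                      | some target =>
                          if target ∈ tmj then
                            (PySem.List.index? tmj target).map (fun m => ((m : Int), tmj, (tmj.length : Int)))
                          else none) = _
          simp only [hp]
          rw [if_pos hk]
        rw [kongLoop_not3 dj d tmj _ p hp hk, hBalt]
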